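-- pv_equiv track=rewrite | github.com/mammaddrik/christopher | src/scytale.py | scytale_encrypt
-- ===== SOURCE A (Python) =====
-- import math
--
-- def scytale_encrypt(plaintext: str, diameter: int) -> str:
--     """
--     Encrypts a plaintext using the Scytale cipher.
--
--     Args:
--     plaintext (str): The plaintext to be encrypted.
--     diameter (int): The diameter of the Scytale cylinder.
--
--     Returns:
--     str: The encrypted ciphertext.
--     """
--     chars = [c.lower() for c in plaintext if c not in (' ',',','.','?','!',':',';',"'")]
--     chunks = math.ceil(len(chars) / float(diameter))
--     inters, i, j = [], 1, 1
--     while i <= chunks: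
--         inters.append(tuple(chars[j - 1:(j + diameter) - 1]))
--         i += 1
--         j += diameter
--     cipher, k = [], 0
--     while k < diameter:
--         l = 0
--         while l < chunks:
--             if k >= len(inters[l]):
--                 cipher.append('|')
--             else:
--                 cipher.append(inters[l][k])
--             l += 1
--         k += 1
--     return ''.join(cipher)
-- ===== SOURCE B (Python) =====
-- import math
--
-- def scytale_encrypt(plaintext: str, diameter: int) -> str:
--     chars = [c.lower() for c in plaintext if c not in (' ', ',', '.', '?', '!', ':', ';', "'")]
--     chunks = math.ceil(len(chars) / float(diameter))
--     return ''.join(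
--         chars[l * diameter + k] if l * diameter + k < len(chars) else '|'
--         for k in range(diameter) for l in range(chunks)
--     )
-- ===== Notes on version B (the rewrite author's own statement) =====
-- stated objective: simpler
-- what changed: B drops A's intermediate row matrix (inters) and its two nested while loops with a per-cell bounds check, emitting each output cell directly by the closed-form index l*diameter+k in a single generator expression.
import Mathlib
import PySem

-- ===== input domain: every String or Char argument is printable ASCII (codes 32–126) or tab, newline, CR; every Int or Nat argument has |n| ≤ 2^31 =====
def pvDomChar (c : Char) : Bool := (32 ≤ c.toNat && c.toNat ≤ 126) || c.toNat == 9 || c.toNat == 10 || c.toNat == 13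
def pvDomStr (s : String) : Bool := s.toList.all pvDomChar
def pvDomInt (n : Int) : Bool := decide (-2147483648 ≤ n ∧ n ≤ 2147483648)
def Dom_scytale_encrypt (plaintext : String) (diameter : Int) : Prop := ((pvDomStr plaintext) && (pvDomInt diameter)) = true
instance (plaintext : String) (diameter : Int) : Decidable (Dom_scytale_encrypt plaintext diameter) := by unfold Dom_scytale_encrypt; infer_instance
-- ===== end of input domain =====

-- B replaces A's intermediate row matrix and nested bounds-checked while loops by a single
-- generator over the closed-form cell index l*diameter+k (objective: simpler).

-- ===== PORT A =====
-- shared first line of both Pythons: filtered, lowercased character list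
def pvChars (plaintext : String) : List Char :=
  (plaintext.toList.filter
    (fun c => !([' ', ',', '.', '?', '!', ':', ';', '\''].contains c))).map PySem.Chars.lowerChar

-- math.ceil(a / float(b)), b ≠ 0; exact as integer ceiling division on this domain
def pvCeilDiv (a b : Int) : Int := -(PySem.Int.floordiv (-a) b)

-- 'while i <= chunks: inters.append(tuple(chars[j-1:(j+diameter)-1])); j += diameter'
def pvRowsA (chars : List Char) (d : Int) : Nat → Int → List (List Char)
  | 0, _ => []
  | n+1, j => PySem.List.slice chars (some (j - 1)) (some (j + d - 1)) :: pvRowsA chars d n (j + d)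

-- inner 'while l < chunks' loop for a fixed k
def pvInnerA (inters : List (List Char)) (k : Int) : Nat → Int → List Char
  | 0, _ => []
  | n+1, l =>
      (if (((PySem.List.pyGet? inters l).getD []).length : Int) ≤ k then '|'
       else (PySem.List.pyGet? ((PySem.List.pyGet? inters l).getD []) k).getD '|')
      :: pvInnerA inters k n (l + 1)

-- outer 'while k < diameter' loop
def pvOuterA (inters : List (List Char)) (chunks : Int) : Nat → Int → List Char
  | 0, _ => []
  | n+1, k => pvInnerA inters k chunks.toNat 0 ++ pvOuterA inters chunks n (k + 1)

def scytale_encrypt (plaintext : String) (diameter : Int) : String :=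
  let chars := pvChars plaintext
  let chunks := pvCeilDiv (chars.length : Int) diameter
  let inters := pvRowsA chars diameter chunks.toNat 1
  String.ofList (pvOuterA inters chunks diameter.toNat 0)

-- ===== PORT B =====
def scytale_encrypt_alt (plaintext : String) (diameter : Int) : String :=
  let chars := pvChars plaintext
  let chunks := pvCeilDiv (chars.length : Int) diameter
  String.ofList ((PySem.List.pyRange 0 diameter 1).flatMap (fun k =>
    (PySem.List.pyRange 0 chunks 1).map (fun l =>
      if l * diameter + k < (chars.length : Int) then PySem.List.pyGetD chars (l * diameter + k) '|'
      else '|')))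

-- ===== PRECONDITION & SPEC =====
-- diameter = 0 makes 'len(chars) / float(diameter)' raise ZeroDivisionError in A (and in B)
def Pre_scytale_encrypt (_plaintext : String) (diameter : Int) : Prop := diameter ≠ 0
instance (plaintext : String) (diameter : Int) : Decidable (Pre_scytale_encrypt plaintext diameter) := by
  unfold Pre_scytale_encrypt; infer_instance

def pvWitness_scytale_encrypt : String × Int := ("hello world", 3)

def Spec_scytale_encrypt (plaintext : String) (diameter : Int) (out : String) : Prop :=
  out = scytale_encrypt_alt plaintext diameter
instance (plaintext : String) (diameter : Int) (out : String) : Decidable (Spec_scytale_encrypt plaintext diameter out) := by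
  unfold Spec_scytale_encrypt; infer_instance

-- ===== CLAIM (what is proved, stated in full; the proofs are below) =====
def Claim_equal_scytale_encrypt : Prop := ∀ (plaintext : String) (diameter : Int), Dom_scytale_encrypt plaintext diameter → Pre_scytale_encrypt plaintext diameter → Spec_scytale_encrypt plaintext diameter (scytale_encrypt plaintext diameter)

-- ===== LEMMAS AND PROOFS =====

-- row l of A's matrix is the slice chars[j-1+l*d : j-1+l*d+d]
theorem pvRowsA_getElem? (chars : List Char) (d : Int) :
    ∀ (n : Nat) (j : Int) (l : Nat), l < n →
      (pvRowsA chars d n j)[l]? =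
        some (PySem.List.slice chars (some (j - 1 + l * d)) (some (j - 1 + l * d + d))) := by
  intro n
  induction n with
  | zero => intro j l h; omega
  | succ n ih =>
    intro j l h
    cases l with
    | zero =>
      simp only [pvRowsA, List.getElem?_cons_zero, Nat.cast_zero, zero_mul, add_zero,
        Option.some.injEq]
      rw [show j + d - 1 = j - 1 + d from by ring]
    | succ l =>
      have := ih (j + d) l (by omega)
      simp only [pvRowsA, List.getElem?_cons_succ, this]
      congr 2 <;> push_cast <;> ring_nf

theorem pvInnerA_eq (chars : List Char) (d chunks k : Int)
    (hd : 0 < d) (hk : 0 ≤ k) (hkd : k < d) :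
    ∀ (n : Nat) (l : Int), 0 ≤ l → l + n = chunks →
      pvInnerA (pvRowsA chars d chunks.toNat 1) k n l =
        (PySem.List.pyRange l chunks 1).map (fun l =>
          if l * d + k < (chars.length : Int) then PySem.List.pyGetD chars (l * d + k) '|'
          else '|') := by
  intro n
  induction n with
  | zero =>
    intro l hl hln
    rw [PySem.List.pyRange_one_eq_nil (by omega)]
    simp [pvInnerA]
  | succ n ih =>
    intro l hl hln
    rw [PySem.List.pyRange_one_cons (by omega)]
    simp only [List.map_cons, pvInnerA]
    have hrec := ih (l + 1) (by omega) (by omega)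
    rw [hrec]
    congr 1
    -- head element
    have hlt : l.toNat < chunks.toNat := by omega
    have hget : PySem.List.pyGet? (pvRowsA chars d chunks.toNat 1) l =
        (pvRowsA chars d chunks.toNat 1)[l.toNat]? := by
      rw [PySem.List.pyGet?_of_nonneg _ hl]
    rw [hget, pvRowsA_getElem? chars d chunks.toNat 1 l.toNat hlt]
    have hld : (1 : Int) - 1 + (l.toNat : Int) * d = l * d := by
      rw [Int.toNat_of_nonneg hl]; ring
    rw [hld]
    have ha : (0:Int) ≤ l * d := by positivity
    have row_eq : PySem.List.slice chars (some (l * d)) (some (l * d + d)) =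
        List.take ((l * d + d).toNat - (l * d).toNat) (List.drop (l * d).toNat chars) :=
      PySem.List.slice_toNat chars ha (by omega)
    have hcast : ((l * d).toNat : Int) = l * d := Int.toNat_of_nonneg ha
    set a : Nat := (l * d).toNat with ha_def
    have htake : (l * d + d).toNat - a = d.toNat := by omega
    rw [row_eq, htake]
    have hlen : (List.take d.toNat (List.drop a chars)).length = min d.toNat (chars.length - a) := by
      simp [List.length_take, List.length_drop]
    simp only [Option.getD_some, hlen]
    by_cases hin : l * d + k < (chars.length : Int)
    · have hkn : k.toNat < min d.toNat (chars.length - a) := by omega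
      rw [if_neg (by push_cast [hlen]; omega), if_pos hin]
      have hidx : (0:Int) ≤ l * d + k := by omega
      rw [PySem.List.pyGetD_eq_getElem chars '|' hidx hin]
      rw [PySem.List.pyGet?_eq_some_getElem _ hk (by rw [hlen]; push_cast; omega)]
      simp only [Option.getD_some]
      rw [List.getElem_take, List.getElem_drop]
      congr 1
      omega
    · rw [if_pos (by push_cast [hlen]; omega), if_neg hin]

theorem pvOuterA_eq (inters : List (List Char)) (chunks : Int) :
    ∀ (n : Nat) (k : Int),
      pvOuterA inters chunks n k =
        (PySem.List.pyRange k (k + n) 1).flatMap (fun kk => pvInnerA inters kk chunks.toNat 0) := by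
  intro n
  induction n with
  | zero =>
    intro k
    rw [show k + (0:Nat) = k by push_cast; ring, PySem.List.pyRange_one_eq_nil le_rfl]
    simp [pvOuterA]
  | succ n ih =>
    intro k
    rw [PySem.List.pyRange_one_cons (by push_cast; omega)]
    simp only [List.flatMap_cons, pvOuterA, ih (k + 1)]
    congr 2
    push_cast; ring_nf

-- ===== VERDICT (by name: the statement is the Claim_ definition above) =====
theorem scytale_encrypt_spec : Claim_equal_scytale_encrypt := by
  intro plaintext diameter _ hpre
  unfold Spec_scytale_encrypt scytale_encrypt scytale_encrypt_alt
  simp only []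
  set chars := pvChars plaintext with hchars
  set chunks := pvCeilDiv (chars.length : Int) diameter with hchunks
  rcases lt_or_gt_of_ne hpre with hneg | hpos
  · -- negative diameter: both loops are empty
    have h1 : diameter.toNat = 0 := by omega
    rw [h1, PySem.List.pyRange_one_eq_nil (show diameter ≤ (0:Int) by omega)]
    simp [pvOuterA]
  · -- positive diameter
    have hdz : (diameter.toNat : Int) = diameter := Int.toNat_of_nonneg (by omega)
    rw [pvOuterA_eq, show (0:Int) + (diameter.toNat : Int) = diameter by rw [hdz]; ring]
    have hc0 : 0 ≤ chunks := by
      have h0 : PySem.Int.floordiv (-(chars.length : Int)) diameter ≤ 0 := by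
        rw [PySem.Int.floordiv_eq_ediv_of_pos hpos]
        exact Int.ediv_nonpos_of_nonpos_of_neg (by omega) hpos
      rw [hchunks]; unfold pvCeilDiv; omega
    have hcong : ∀ k ∈ PySem.List.pyRange 0 diameter 1,
        pvInnerA (pvRowsA chars diameter chunks.toNat 1) k chunks.toNat 0 =
          (PySem.List.pyRange 0 chunks 1).map (fun l =>
            if l * diameter + k < (chars.length : Int) then
              PySem.List.pyGetD chars (l * diameter + k) '|'
            else '|') := by
      intro k hk
      rw [PySem.List.mem_pyRange_one] at hk
      exact pvInnerA_eq chars diameter chunks k hpos hk.1 hk.2 chunks.toNat 0 le_rfl (by omega)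
    rw [List.flatMap_def, List.map_congr_left hcong, ← List.flatMap_def]
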